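-- pv_equiv track=rewrite | github.com/cuappdev/score-backend | binary_segregation.py | getMaxCostOptimized
-- ===== SOURCE A (Python) =====
-- def getMaxCostOptimized(s):
--     """
--     Optimized version that calculates cost without explicitly tracking positions.
--     """
--     n = len(s)
--     total_cost = 0
--     ones_count = 0
--
--     # Process from right to left
--     for i in range(n - 1, -1, -1):
--         if s[i] == '1':
--             # This '1' can move to position (n - 1 - ones_count)
--             # Distance = (n - 1 - ones_count) - i
--             distance = (n - 1 - ones_count) - i
--             if distance > 0:
--                 total_cost += 1 + distance
--             ones_count += 1
--
--     return total_cost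
-- ===== SOURCE B (Python) =====
-- def getMaxCostOptimized(s):
--     # Double counting: instead of summing, for each '1', the gaps to its
--     # right, sum for each gap the number of ones to its left; the "+1" per
--     # movable '1' equals the ones count before the last gap.
--     cost = 0
--     ones_before = 0
--     last = 0
--     for ch in s:
--         if ch == '1':
--             ones_before += 1
--         else:
--             cost += ones_before
--             last = ones_before
--     return cost + last
-- ===== Notes on version B (the rewrite author's own statement) =====
-- stated objective: alternative
-- what changed: Exchanges the order of summation: instead of adding, for each '1', 1 plus the count of gap characters to its right, B adds, for each gap character, the count of ones to its left, and adds once the ones count before the last gap (which equals the number of ones that pay the '+1'); no right-to-left scan, no index arithmetic, no gap total.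
import Mathlib
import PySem

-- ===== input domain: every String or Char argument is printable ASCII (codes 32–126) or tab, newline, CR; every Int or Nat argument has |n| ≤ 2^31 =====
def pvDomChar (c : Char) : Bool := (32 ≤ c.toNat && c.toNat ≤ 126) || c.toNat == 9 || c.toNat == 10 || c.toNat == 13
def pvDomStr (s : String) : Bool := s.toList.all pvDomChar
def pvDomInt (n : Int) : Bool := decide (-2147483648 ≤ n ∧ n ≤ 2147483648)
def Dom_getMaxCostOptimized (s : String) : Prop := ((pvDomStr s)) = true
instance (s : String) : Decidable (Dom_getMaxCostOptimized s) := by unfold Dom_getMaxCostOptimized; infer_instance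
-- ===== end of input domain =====

-- B exchanges the order of summation: it sums, per gap character, the ones to
-- its left (plus the ones before the last gap), instead of A's per-'1' sum of
-- gaps to the right (objective: alternative).

-- ===== PORT A =====
def getMaxCostOptimized (s : String) : Int :=
  let n : Int := PySem.Str.len s
  let r : Int × Int :=
    (PySem.List.pyRange (n - 1) (-1) (-1)).foldl
      (fun (st : Int × Int) i =>
        if PySem.Str.pyGet? s i = some '1' then
          let distance := (n - 1 - st.2) - i
          ((if distance > 0 then st.1 + 1 + distance else st.1), st.2 + 1)
        else st)
      (0, 0)
  r.1

-- ===== PORT B =====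
def getMaxCostOptimized_alt (s : String) : Int :=
  let r : Int × Int × Int :=
    s.toList.foldl
      (fun (st : Int × Int × Int) ch =>
        if ch = '1' then (st.1, st.2.1 + 1, st.2.2)
        else (st.1 + st.2.1, st.2.1, st.2.1))
      (0, 0, 0)
  r.1 + r.2.2

-- ===== PRECONDITION & SPEC =====
def Spec_getMaxCostOptimized (s : String) (out : Int) : Prop := out = getMaxCostOptimized_alt s
instance (s : String) (out : Int) : Decidable (Spec_getMaxCostOptimized s out) := by unfold Spec_getMaxCostOptimized; infer_instance

-- ===== CLAIM (what is proved, stated in full; the proofs are below) =====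
def Claim_equal_getMaxCostOptimized : Prop := ∀ (s : String), Dom_getMaxCostOptimized s → Spec_getMaxCostOptimized s (getMaxCostOptimized s)

-- ===== LEMMAS AND PROOFS =====

/-- Number of non-'1' characters, as an Int. -/
def pvGaps (l : List Char) : Int := (l.countP (fun c => c ≠ '1') : Int)

/-- Number of '1' characters, as an Int. -/
def pvOnes (l : List Char) : Int := (l.countP (fun c => c = '1') : Int)

/-- Reference value: for each '1', add 1 + (gaps strictly after it) when positive. -/
def pvF : List Char → Int
  | [] => 0
  | c :: t => pvF t + (if c = '1' then (if pvGaps t > 0 then 1 + pvGaps t else 0) else 0)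

/-- A's loop body, over a plain char list. -/
def pvStepA (l : List Char) (st : Int × Int) (i : Int) : Int × Int :=
  if PySem.List.pyGet? l i = some '1' then
    let distance := ((l.length : Int) - 1 - st.2) - i
    ((if distance > 0 then st.1 + 1 + distance else st.1), st.2 + 1)
  else st

lemma pvGaps_add_ones (l : List Char) : pvGaps l + pvOnes l = (l.length : Int) := by
  induction l with
  | nil => simp [pvGaps, pvOnes]
  | cons c t ih =>
      simp only [pvGaps, pvOnes, ne_eq, decide_not, List.countP_cons] at *
      by_cases h : c = '1' <;> simp only [h] <;> push_cast <;> simp <;> omega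

lemma pvGaps_cons_one (t : List Char) : pvGaps ('1' :: t) = pvGaps t := by
  simp [pvGaps]

lemma pvGaps_cons_ne (c : Char) (t : List Char) (h : c ≠ '1') :
    pvGaps (c :: t) = 1 + pvGaps t := by
  simp [pvGaps, h]
  omega

lemma pvGaps_nonneg (l : List Char) : 0 ≤ pvGaps l := by
  simp [pvGaps]

lemma pvOnes_cons_one (t : List Char) : pvOnes ('1' :: t) = pvOnes t + 1 := by
  simp [pvOnes]

lemma pvOnes_cons_ne (c : Char) (t : List Char) (h : c ≠ '1') :
    pvOnes (c :: t) = pvOnes t := by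
  simp [pvOnes, h]

/-- No gaps means no cost. -/
lemma pvF_of_gaps_zero (l : List Char) (h : pvGaps l = 0) : pvF l = 0 := by
  induction l with
  | nil => simp [pvF]
  | cons c t ih =>
      by_cases hc : c = '1'
      · subst hc
        rw [pvGaps_cons_one] at h
        simp [pvF, ih h, h]
      · rw [pvGaps_cons_ne c t hc] at h
        have := pvGaps_nonneg t
        omega

/-- The tail of A's loop on `c :: t` (indices 1 .. n, processed right to left via foldr)
behaves like the whole loop on `t`. -/
lemma pvStepA_shift (c : Char) (t : List Char) (init : Int × Int) :
    (PySem.List.pyRange 1 ((t.length : Int) + 1) 1).foldr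
        (fun i st => pvStepA (c :: t) st i) init
      = (PySem.List.pyRange 0 (t.length : Int) 1).foldr
        (fun i st => pvStepA t st i) init := by
  rw [PySem.List.pyRange_one 1, PySem.List.pyRange_one 0]
  have h1 : ((t.length : Int) + 1 - 1).toNat = t.length := by omega
  have h2 : ((t.length : Int) - 0).toNat = t.length := by omega
  rw [h1, h2, List.foldr_map, List.foldr_map]
  have hfun : (fun (k : ℕ) (st : Int × Int) => pvStepA (c :: t) st (1 + (k : Int)))
      = (fun (k : ℕ) (st : Int × Int) => pvStepA t st (0 + (k : Int))) := by
    funext k st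
    unfold pvStepA
    have hget : PySem.List.pyGet? (c :: t) (1 + (k : Int))
        = PySem.List.pyGet? t (0 + (k : Int)) := by
      rw [add_comm 1 (k : Int), PySem.List.pyGet?_cons_succ]
      simp
    rw [hget]
    have hd : (((c :: t).length : Int) - 1 - st.2) - (1 + (k : Int))
        = ((t.length : Int) - 1 - st.2) - (0 + (k : Int)) := by
      push_cast [List.length_cons]
      ring
    rw [hd]
  rw [hfun]

/-- Processing index 0 last turns the state for `t` into the state for `c :: t`. -/
lemma pvStepA_zero (c : Char) (t : List Char) :
    pvStepA (c :: t) (pvF t, pvOnes t) 0 = (pvF (c :: t), pvOnes (c :: t)) := by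
  by_cases h : c = '1'
  · subst h
    simp only [pvStepA, PySem.List.pyGet?_zero_cons]
    have hg : (((('1' : Char) :: t).length : Int) - 1 - pvOnes t) - 0 = pvGaps t := by
      have := pvGaps_add_ones t
      simp only [List.length_cons]
      push_cast
      omega
    rw [hg, if_pos trivial]
    split_ifs with hp <;> (simp [pvF, pvOnes_cons_one, hp, Prod.mk.injEq]; try omega)
  · simp only [pvStepA, PySem.List.pyGet?_zero_cons]
    rw [if_neg (by simp [h])]
    simp [pvF, h, pvOnes_cons_ne c t h]

/-- A's loop over indices 0..n-1 as a foldr (last processed index first in the list). -/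
lemma pvRunA_fwd (l : List Char) :
    (PySem.List.pyRange 0 (l.length : Int) 1).foldr
        (fun i st => pvStepA l st i) (0, 0) = (pvF l, pvOnes l) := by
  induction l with
  | nil =>
      rw [PySem.List.pyRange_one_eq_nil (by simp)]
      simp [pvF, pvOnes]
  | cons c t ih =>
      rw [PySem.List.pyRange_one_cons (by exact_mod_cast t.length.succ_pos), List.foldr_cons]
      have hn : ((c :: t).length : Int) = (t.length : Int) + 1 := by
        push_cast [List.length_cons]; ring
      have h01 : (0 : Int) + 1 = 1 := by norm_num
      rw [hn, h01, pvStepA_shift, ih, pvStepA_zero]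

/-- A's countdown loop computes the reference value and the ones count. -/
lemma pvRunA (l : List Char) :
    (PySem.List.pyRange ((l.length : Int) - 1) (-1) (-1)).foldl (pvStepA l) (0, 0)
      = (pvF l, pvOnes l) := by
  have e : PySem.List.pyRange ((l.length : Int) - 1) (-1) (-1)
      = (PySem.List.pyRange 0 (l.length : Int) 1).reverse := by
    rw [PySem.List.pyRange_neg_one_eq_reverse]
    norm_num
  rw [e, List.foldl_reverse]
  exact pvRunA_fwd l

/-- B's gap-sum loop: cost + last equals A's per-'1' sum, shifted by the ones
count `o` carried in from the left (each of the `pvGaps l` gaps counts `o`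
more ones, and the '+1' term counts `o` more once, when any gap exists). -/
lemma pvRunB (l : List Char) (c o last : Int) :
    (l.foldl
        (fun (st : Int × Int × Int) ch =>
          if ch = '1' then (st.1, st.2.1 + 1, st.2.2)
          else (st.1 + st.2.1, st.2.1, st.2.1))
        (c, o, last)).1
      + (l.foldl
        (fun (st : Int × Int × Int) ch =>
          if ch = '1' then (st.1, st.2.1 + 1, st.2.2)
          else (st.1 + st.2.1, st.2.1, st.2.1))
        (c, o, last)).2.2
      = c + (if pvGaps l > 0 then pvF l + o * (pvGaps l + 1) else last) := by
  induction l generalizing c o last with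
  | nil => simp [pvGaps]
  | cons x t ih =>
      by_cases hx : x = '1'
      · subst hx
        simp only [List.foldl_cons, if_true]
        rw [ih c (o + 1) last, pvGaps_cons_one]
        by_cases hg : pvGaps t > 0
        · rw [if_pos hg, if_pos hg]
          simp only [pvF, if_true, if_pos hg]
          ring
        · rw [if_neg hg, if_neg hg]
      · simp only [List.foldl_cons, if_neg hx]
        rw [ih (c + o) o o, pvGaps_cons_ne x t hx]
        have hgt : pvGaps t ≥ 0 := pvGaps_nonneg t
        rw [if_pos (by omega : 1 + pvGaps t > 0)]
        by_cases hg : pvGaps t > 0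
        · rw [if_pos hg]
          simp only [pvF, if_neg hx]
          ring
        · rw [if_neg hg]
          have hz : pvGaps t = 0 := by omega
          simp only [pvF, if_neg hx]
          rw [pvF_of_gaps_zero t hz, hz]
          ring

-- ===== VERDICT (by name: the statement is the Claim_ definition above) =====
theorem getMaxCostOptimized_spec : Claim_equal_getMaxCostOptimized := by
  intro s _
  unfold Spec_getMaxCostOptimized
  have hA : getMaxCostOptimized s
      = ((PySem.List.pyRange ((s.toList.length : Int) - 1) (-1) (-1)).foldl
          (pvStepA s.toList) (0, 0)).1 := rfl
  rw [hA, pvRunA]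
  show pvF s.toList = getMaxCostOptimized_alt s
  unfold getMaxCostOptimized_alt
  rw [pvRunB s.toList 0 0 0]
  by_cases hg : pvGaps s.toList > 0
  · rw [if_pos hg]; ring
  · rw [if_neg hg]
    have hz : pvGaps s.toList = 0 := by
      have := pvGaps_nonneg s.toList; omega
    rw [pvF_of_gaps_zero s.toList hz]
    norm_num
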